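-- pv_equiv track=rewrite | github.com/Jerempire/gym-anything | benchmarks/cua_world/environments/graphite_env/tasks/resource_consumption_accounting/verifier.py | _find_graph
-- ===== SOURCE A (Python) =====
-- def _find_graph(graphs, expected_title):
--     """Find a graph by exact title, then case-insensitive. Returns (title, targets) or None."""
--     for title, targets in graphs:
--         if title == expected_title:
--             return title, targets
--     for title, targets in graphs:
--         if expected_title.lower() in title.lower():
--             return title, targets
--     return None
-- ===== SOURCE B (Python) =====
-- def _find_graph(graphs, expected_title):
--     """Single pass: exact match returns immediately; first case-insensitive
--     substring match is kept as a fallback returned after the loop."""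
--     fallback = None
--     needle = expected_title.lower()
--     for title, targets in graphs:
--         if title == expected_title:
--             return title, targets
--         if fallback is None and needle in title.lower():
--             fallback = (title, targets)
--     return fallback
-- ===== Notes on version B (the rewrite author's own statement) =====
-- stated objective: simpler
-- what changed: Replaced A's two full scans (exact-match pass, then substring pass) by one loop that returns on an exact match and records the first case-insensitive substring hit as a fallback returned after the loop; expected_title is lowered once instead of per element.
import Mathlib
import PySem

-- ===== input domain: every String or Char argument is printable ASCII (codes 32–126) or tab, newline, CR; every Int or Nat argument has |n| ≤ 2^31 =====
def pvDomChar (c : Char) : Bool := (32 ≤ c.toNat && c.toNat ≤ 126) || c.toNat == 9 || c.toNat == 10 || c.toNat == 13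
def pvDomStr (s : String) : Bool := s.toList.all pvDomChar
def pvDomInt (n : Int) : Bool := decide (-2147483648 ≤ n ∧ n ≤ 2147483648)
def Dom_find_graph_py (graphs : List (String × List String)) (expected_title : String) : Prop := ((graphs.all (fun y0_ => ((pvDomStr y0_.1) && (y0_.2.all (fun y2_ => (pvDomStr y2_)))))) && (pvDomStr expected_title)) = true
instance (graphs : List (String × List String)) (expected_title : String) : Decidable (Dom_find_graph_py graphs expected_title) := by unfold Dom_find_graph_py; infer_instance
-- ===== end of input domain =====

-- B collapses A's two full scans into one pass with a saved fallback candidate (objective: simpler).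


-- ===== PORT A =====
-- first loop of A: return the first pair whose title equals expected_title
def findExactLoop (graphs : List (String × List String)) (expected_title : String) : Option (String × List String) :=
  match graphs with
  | [] => none
  | (title, targets) :: rest =>
    if title = expected_title then some (title, targets)
    else findExactLoop rest expected_title

-- second loop of A: return the first pair whose lowered title contains the lowered expected_title
def findSubLoop (graphs : List (String × List String)) (expected_title : String) : Option (String × List String) :=
  match graphs with
  | [] => none
  | (title, targets) :: rest =>
    if PySem.Str.isIn (PySem.Str.lower expected_title) (PySem.Str.lower title) then some (title, targets)
    else findSubLoop rest expected_title

def find_graph_py (graphs : List (String × List String)) (expected_title : String) : Option (String × List String) :=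
  match findExactLoop graphs expected_title with
  | some p => some p
  | none => findSubLoop graphs expected_title

-- ===== PORT B =====
-- B's single loop, carrying the fallback accumulator
def altLoop (graphs : List (String × List String)) (expected_title needle : String)
    (fallback : Option (String × List String)) : Option (String × List String) :=
  match graphs with
  | [] => fallback
  | (title, targets) :: rest =>
    if title = expected_title then some (title, targets)
    else
      altLoop rest expected_title needle
        (if fallback.isNone && PySem.Str.isIn needle (PySem.Str.lower title) then some (title, targets)
         else fallback)

def find_graph_py_alt (graphs : List (String × List String)) (expected_title : String) : Option (String × List String) :=
  altLoop graphs expected_title (PySem.Str.lower expected_title) none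

-- ===== PRECONDITION & SPEC =====
def Spec_find_graph_py (graphs : List (String × List String)) (expected_title : String) (out : Option (String × List String)) : Prop := out = find_graph_py_alt graphs expected_title
instance (graphs : List (String × List String)) (expected_title : String) (out : Option (String × List String)) : Decidable (Spec_find_graph_py graphs expected_title out) := by unfold Spec_find_graph_py; infer_instance

-- ===== CLAIM (what is proved, stated in full; the proofs are below) =====
def Claim_equal_find_graph_py : Prop := ∀ (graphs : List (String × List String)) (expected_title : String), Dom_find_graph_py graphs expected_title → Spec_find_graph_py graphs expected_title (find_graph_py graphs expected_title)

-- ===== LEMMAS AND PROOFS =====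

-- the single pass equals: exact-scan result, else the fallback, else the substring-scan result
theorem altLoop_eq (graphs : List (String × List String)) (expected_title : String)
    (fallback : Option (String × List String)) :
    altLoop graphs expected_title (PySem.Str.lower expected_title) fallback =
      match findExactLoop graphs expected_title with
      | some p => some p
      | none =>
        match fallback with
        | some q => some q
        | none => findSubLoop graphs expected_title := by
  induction graphs generalizing fallback with
  | nil => cases fallback <;> simp [altLoop, findExactLoop, findSubLoop]
  | cons hd rest ih =>
    obtain ⟨title, targets⟩ := hd
    by_cases hx : title = expected_title
    · simp [altLoop, findExactLoop, hx]
    · cases fallback with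
      | some q =>
        simp [altLoop, findExactLoop, hx, Option.isNone, ih]
      | none =>
        simp only [altLoop, findExactLoop, findSubLoop, if_neg hx, Option.isNone_none,
          Bool.true_and, ih]
        cases findExactLoop rest expected_title <;> split_ifs <;> rfl

-- ===== VERDICT (by name: the statement is the Claim_ definition above) =====
theorem find_graph_py_spec : Claim_equal_find_graph_py := by
  intro graphs expected_title _
  unfold Spec_find_graph_py find_graph_py find_graph_py_alt
  rw [altLoop_eq]
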